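-- pv_equiv track=rewrite | github.com/warriors44/DNAWorks | dnaworks.py | find_consecutive_bases
-- ===== SOURCE A (Python) =====
-- from typing import Literal, Optional, List, Tuple, Dict
--
-- def find_consecutive_bases(dna_sequence: str, min_length: int = 6) -> List[tuple]:
--     """
--     Detect regions where the same base is repeated min_length or more times.
--
--     Args:
--         dna_sequence: DNA sequence
--         min_length: Minimum consecutive length to detect (default: 6)
--
--     Returns:
--         List of consecutive regions. Each element is a (start_index, end_index, base) tuple.
--     """
--     consecutive_regions = []
--     i = 0
--     while i < len(dna_sequence):
--         base = dna_sequence[i]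
--         start = i
--         while i < len(dna_sequence) and dna_sequence[i] == base:
--             i += 1
--         length = i - start
--         if length >= min_length:
--             consecutive_regions.append((start, i, base))
--     return consecutive_regions
-- ===== SOURCE B (Python) =====
-- def find_consecutive_bases(dna_sequence: str, min_length: int = 6):
--     # Boundary-based: first collect the start index of every maximal run
--     # (position 0 or any position whose char differs from its predecessor),
--     # then pair each start with the next start (or the string end) and keep
--     # long enough intervals.
--     n = len(dna_sequence)
--     starts = [i for i in range(n) if i == 0 or dna_sequence[i] != dna_sequence[i - 1]]
--     ends = starts[1:] + [n]
--     return [(a, b, dna_sequence[a]) for a, b in zip(starts, ends) if b - a >= min_length]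
-- ===== Notes on version B (the rewrite author's own statement) =====
-- stated objective: alternative
-- what changed: Replaces A's nested two-pointer while-loop scan by a staged boundary decomposition: first collect all run-start indices with a filtered range pass, then zip each start with the next start (or the string end) and keep the long intervals.
import Mathlib
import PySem

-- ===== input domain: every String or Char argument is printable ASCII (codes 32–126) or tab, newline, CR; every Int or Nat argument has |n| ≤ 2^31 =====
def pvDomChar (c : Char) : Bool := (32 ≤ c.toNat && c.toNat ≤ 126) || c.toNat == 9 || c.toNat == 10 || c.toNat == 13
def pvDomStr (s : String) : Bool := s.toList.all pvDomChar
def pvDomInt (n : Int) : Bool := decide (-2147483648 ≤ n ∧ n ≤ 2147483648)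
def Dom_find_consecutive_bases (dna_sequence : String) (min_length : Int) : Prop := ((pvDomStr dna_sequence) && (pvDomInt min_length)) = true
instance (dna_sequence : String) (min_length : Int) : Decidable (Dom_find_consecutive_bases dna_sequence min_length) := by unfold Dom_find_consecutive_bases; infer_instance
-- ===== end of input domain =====

-- B replaces A's nested two-pointer while loops by a staged boundary decomposition:
-- collect all run-start indices, zip each with the next one (or the end), keep the long intervals.

-- ===== PORT A =====
-- inner loop: `while i < len(dna_sequence) and dna_sequence[i] == base: i += 1`
def pvInnerA (s : List Char) (base : Char) (i : Nat) : Nat :=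
  if _ : i < s.length ∧ s[i]? = some base then pvInnerA s base (i + 1) else i
termination_by s.length - i
decreasing_by omega

-- the two facts the outer loop's termination cites (the inner loop never moves i backwards / moves it strictly forward)
lemma pvInnerA_ge (s : List Char) (base : Char) (i : Nat) : i ≤ pvInnerA s base i := by
  fun_induction pvInnerA with
  | case1 i h ih => omega
  | case2 i h => omega

lemma pvInnerA_gt (s : List Char) (base : Char) (i : Nat)
    (h1 : i < s.length) (h2 : s[i]? = some base) : i < pvInnerA s base i := by
  rw [pvInnerA, dif_pos ⟨h1, h2⟩]
  have := pvInnerA_ge s base (i + 1); omega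

-- outer loop: `while i < len(dna_sequence): …` (appends to consecutive_regions)
def pvOuterA (s : List Char) (min_length : Int) (i : Nat)
    (acc : List (Int × Int × String)) : List (Int × Int × String) :=
  if h : i < s.length then
    let base := s[i]
    let j := pvInnerA s base i
    let length : Int := (j : Int) - (i : Int)
    pvOuterA s min_length j
      (if length ≥ min_length then acc ++ [((i : Int), (j : Int), String.ofList [base])] else acc)
  else acc
termination_by s.length - i
decreasing_by
  have := pvInnerA_gt s s[i] i h (by simp)
  omega

def find_consecutive_bases (dna_sequence : String) (min_length : Int) : List (Int × Int × String) :=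
  pvOuterA dna_sequence.toList min_length 0 []

-- ===== PORT B =====
-- `starts = [i for i in range(n) if i == 0 or s[i] != s[i-1]]`
-- (for i ≥ 1 both indices are in range, so getElem? is exact here; Python's short-circuit `or`
--  never evaluates s[i-1] at i = 0, matching the left disjunct below)
def pvStartsB (l : List Char) : List Nat :=
  (List.range l.length).filter (fun i => i == 0 || decide (l[i]? ≠ l[i - 1]?))

def find_consecutive_bases_alt (dna_sequence : String) (min_length : Int) : List (Int × Int × String) :=
  let l := dna_sequence.toList
  let starts := pvStartsB l
  let ends := starts.drop 1 ++ [l.length]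
  -- `[(a, b, s[a]) for a, b in zip(starts, ends) if b - a >= min_length]`; a < n always, so getD is exact
  ((starts.zip ends).filter (fun p => decide ((p.2 : Int) - (p.1 : Int) ≥ min_length))).map
    (fun p => ((p.1 : Int), (p.2 : Int), String.ofList [l.getD p.1 ' ']))

-- ===== PRECONDITION & SPEC =====
def Spec_find_consecutive_bases (dna_sequence : String) (min_length : Int) (out : List (Int × Int × String)) : Prop := out = find_consecutive_bases_alt dna_sequence min_length
instance (dna_sequence : String) (min_length : Int) (out : List (Int × Int × String)) : Decidable (Spec_find_consecutive_bases dna_sequence min_length out) := by unfold Spec_find_consecutive_bases; infer_instance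

-- ===== CLAIM (what is proved, stated in full; the proofs are below) =====
def Claim_equal_find_consecutive_bases : Prop := ∀ (dna_sequence : String) (min_length : Int), Dom_find_consecutive_bases dna_sequence min_length → Spec_find_consecutive_bases dna_sequence min_length (find_consecutive_bases dna_sequence min_length)

-- ===== LEMMAS AND PROOFS =====

-- proof-side intermediate: the run decomposition both programs compute
def pvRuns (s : List Char) (idx : Nat) (m : Int) : List (Int × Int × String) :=
  match h : s with
  | [] => []
  | c :: rest =>
    let n := (s.takeWhile (· == c)).length
    let tail := pvRuns (s.dropWhile (· == c)) (idx + n) m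
    if (n : Int) ≥ m then ((idx : Int), ((idx + n : Nat) : Int), String.ofList [c]) :: tail
    else tail
termination_by s.length
decreasing_by
  subst h
  rw [List.dropWhile_cons_of_pos (by simp)]
  have := List.length_dropWhile_le (· == c) rest
  simp only [List.length_cons]; omega

-- A's inner while loop lands on i + (length of the maximal run of `base` starting at i)
lemma pvInnerA_eq_takeWhile (s : List Char) (base : Char) (i : Nat) :
    pvInnerA s base i = i + ((s.drop i).takeWhile (· == base)).length := by
  fun_induction pvInnerA with
  | case1 i h ih =>
    obtain ⟨hlt, hget⟩ := h
    have hdrop : s.drop i = s[i] :: s.drop (i + 1) := by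
      simpa using (List.drop_eq_getElem_cons hlt)
    have hbase : s[i] = base := by
      rw [List.getElem?_eq_getElem hlt] at hget; exact Option.some.inj hget
    rw [hdrop, hbase, List.takeWhile_cons, if_pos (by simp)]
    simp only [List.length_cons] at ih ⊢; omega
  | case2 i h =>
    by_cases hlt : i < s.length
    · have hget : ¬ s[i]? = some base := fun hc => h ⟨hlt, hc⟩
      have hdrop : s.drop i = s[i] :: s.drop (i + 1) := by
        simpa using (List.drop_eq_getElem_cons hlt)
      have hne : ¬ (s[i] == base) = true := by
        simp only [beq_iff_eq]
        intro hc
        exact hget (by rw [List.getElem?_eq_getElem hlt, hc])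
      rw [hdrop, List.takeWhile_cons, if_neg hne]
      simp
    · rw [List.drop_eq_nil_of_le (by omega)]
      simp

-- loop correspondence: A's outer loop from index i equals acc ++ the runs of the suffix s.drop i
lemma pvOuter_eq_runs (s : List Char) (m : Int) (i : Nat)
    (acc : List (Int × Int × String)) :
    pvOuterA s m i acc = acc ++ pvRuns (s.drop i) i m := by
  fun_induction pvOuterA with
  | case1 i acc h base j length ih =>
    have hdrop : s.drop i = s[i] :: s.drop (i + 1) := by
      simpa using (List.drop_eq_getElem_cons h)
    have hbase : base = s[i] := rfl
    set n := ((s.drop i).takeWhile (· == s[i])).length with hn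
    have hj : j = i + n := by
      have : j = pvInnerA s base i := rfl
      rw [this, hbase, pvInnerA_eq_takeWhile]
    have hlen : length = (n : Int) := by
      have : length = (j : Int) - (i : Int) := rfl
      rw [this, hj]; push_cast; ring
    have hpos : 0 < n := by
      rw [hn, hdrop, List.takeWhile_cons, if_pos (by simp)]; simp
    have hdw : (s.drop i).dropWhile (· == s[i]) = s.drop (i + n) := by
      have h1 : (s.drop i).takeWhile (· == s[i]) ++ (s.drop i).dropWhile (· == s[i]) = s.drop i :=
        List.takeWhile_append_dropWhile
      have h2 : (s.drop i).dropWhile (· == s[i]) = (s.drop i).drop n := by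
        conv_rhs => rw [← h1]
        rw [List.drop_append_of_le_length (by omega)]
        simp [hn]
      rw [h2, List.drop_drop]
    simp only [dite_eq_ite] at ih
    rw [ih]
    conv_rhs => rw [hdrop, pvRuns]
    simp only [← hdrop, ← hn, hdw, hbase, hj, hlen]
    by_cases hge : (n : Int) ≥ m
    · rw [if_pos hge, if_pos hge]
      simp
    · rw [if_neg hge, if_neg hge]
  | case2 i acc h =>
    rw [List.drop_eq_nil_of_le (by omega), pvRuns]
    simp

-- B's pipeline over a plain char list
def pvPipe (l : List Char) (m : Int) : List (Int × Int × String) :=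
  let starts := pvStartsB l
  let ends := starts.drop 1 ++ [l.length]
  ((starts.zip ends).filter (fun p => decide ((p.2 : Int) - (p.1 : Int) ≥ m))).map
    (fun p => ((p.1 : Int), (p.2 : Int), String.ofList [l.getD p.1 ' ']))

-- first element of a dropWhile result fails the predicate
lemma pvDropWhile_getElem0 {α : Type} (p : α → Bool) (l : List α) {x : α}
    (h : (l.dropWhile p)[0]? = some x) : p x = false := by
  cases hd : l.dropWhile p with
  | nil => rw [hd] at h; simp at h
  | cons y ys =>
    rw [hd] at h
    simp only [List.getElem?_cons_zero, Option.some.injEq] at h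
    subst h
    have hw : l.dropWhile p ≠ [] := by rw [hd]; simp
    have := List.head_dropWhile_not p hw
    simp only [hd, List.head_cons] at this
    exact this

-- run-start indices of c::rest: 0, then the run-starts of the remainder shifted by the first run's length
lemma pvStartsB_cons (c : Char) (rest : List Char) :
    pvStartsB (c :: rest) =
      0 :: (pvStartsB ((c :: rest).dropWhile (· == c))).map
        (fun j => ((c :: rest).takeWhile (· == c)).length + j) := by
  set l := c :: rest with hl
  set T := l.takeWhile (· == c) with hT
  set t := l.dropWhile (· == c) with ht
  set k := T.length with hk
  have hTt : T ++ t = l := List.takeWhile_append_dropWhile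
  have hk1 : 1 ≤ k := by
    rw [hk, hT, hl, List.takeWhile_cons, if_pos (by simp)]; simp
  have hlen : l.length = k + t.length := by
    rw [← hTt]; simp [hk]
  have hTc : ∀ i, i < k → l[i]? = some c := by
    intro i hi
    rw [← hTt, List.getElem?_append_left (by omega)]
    rw [List.getElem?_eq_getElem (by omega)]
    have hmem : T[i] ∈ T := List.getElem_mem _
    have := List.mem_takeWhile_imp (l := l) (p := (· == c)) (by rw [← hT]; exact hmem)
    simp only [beq_iff_eq] at this
    rw [this]
  have hkt : ∀ j : Nat, l[k + j]? = t[j]? := by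
    intro j
    rw [← hTt, List.getElem?_append_right (by omega)]
    congr 1; omega
  rw [pvStartsB, pvStartsB, hlen, List.range_add, List.filter_append, List.filter_map]
  have hfirst : (List.range k).filter (fun i => i == 0 || decide (l[i]? ≠ l[i - 1]?)) = [0] := by
    have : k = 1 + (k - 1) := by omega
    rw [this, List.range_add, List.filter_append]
    have h1 : (List.range 1).filter (fun i => i == 0 || decide (l[i]? ≠ l[i - 1]?)) = [0] := by
      simp
    have h2 : ((List.range (k - 1)).map (fun x => 1 + x)).filter
        (fun i => i == 0 || decide (l[i]? ≠ l[i - 1]?)) = [] := by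
      rw [List.filter_eq_nil_iff]
      intro a ha
      simp only [List.mem_map, List.mem_range] at ha
      obtain ⟨j, hj, rfl⟩ := ha
      have e1 : l[1 + j]? = some c := hTc _ (by omega)
      have e2 : l[j]? = some c := hTc _ (by omega)
      simp [e1, e2]
    rw [h1, h2, List.append_nil]
  have hsecond : ((List.range t.length).filter
        ((fun i => i == 0 || decide (l[i]? ≠ l[i - 1]?)) ∘ (fun x => k + x))) =
      (List.range t.length).filter (fun j => j == 0 || decide (t[j]? ≠ t[j - 1]?)) := by
    apply List.filter_congr
    intro j hj
    simp only [List.mem_range] at hj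
    simp only [Function.comp_apply]
    have hk0 : (k + j == 0) = false := by simp; omega
    match j with
    | 0 =>
      obtain ⟨x, hx⟩ : ∃ x, t[0]? = some x :=
        ⟨t[0]'(by omega), List.getElem?_eq_getElem (by omega)⟩
      have hpx : (x == c) = false := pvDropWhile_getElem0 (· == c) l (ht ▸ hx)
      have e1 : l[k + 0]? = some x := (hkt 0).trans hx
      have e2 : l[k - 1]? = some c := hTc _ (by omega)
      have hxc : x ≠ c := by intro hc; rw [hc] at hpx; simp at hpx
      have e1' : l[k]? = some x := by simpa using e1
      have hne' : l[k]? ≠ l[k - 1]? := by rw [e1', e2]; simp [hxc]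
      simp [hne']
    | j' + 1 =>
      have e1 : l[k + (j' + 1)]? = t[j' + 1]? := hkt _
      have e2 : l[k + j']? = t[j']? := hkt _
      simp [e1, e2, show k + (j' + 1) - 1 = k + j' by omega]
  rw [hfirst, hsecond]
  simp

-- shift lemma for pvRuns
lemma pvRuns_shift (m : Int) (l : List Char) (a : Nat) : ∀ (idx : Nat),
    pvRuns l (a + idx) m =
      (pvRuns l idx m).map (fun p => (p.1 + (a : Int), p.2.1 + (a : Int), p.2.2)) := by
  induction hN : l.length using Nat.strong_induction_on generalizing l with
  | _ N ih =>
    intro idx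
    match l with
    | [] => rw [pvRuns, pvRuns]; simp
    | c :: rest =>
      rw [pvRuns, pvRuns]
      have hlt : ((c :: rest).dropWhile (· == c)).length < N := by
        subst hN
        rw [List.dropWhile_cons_of_pos (by simp)]
        have := List.length_dropWhile_le (· == c) rest
        simp only [List.length_cons]; omega
      have hrec := ih _ hlt ((c :: rest).dropWhile (· == c)) rfl
        (idx + ((c :: rest).takeWhile (· == c)).length)
      rw [show a + idx + ((c :: rest).takeWhile (· == c)).length
            = a + (idx + ((c :: rest).takeWhile (· == c)).length) by omega, hrec]
      split_ifs
      · simp only [List.map_cons]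
        congr 1
        simp only [Prod.mk.injEq]
        push_cast
        exact ⟨by ring, by ring, trivial⟩
      · rfl

-- B's pipeline computes the run decomposition
lemma pvPipe_eq_runs (m : Int) : ∀ (N : Nat) (l : List Char), l.length ≤ N →
    pvPipe l m = pvRuns l 0 m := by
  intro N
  induction N with
  | zero =>
    intro l hlen
    have : l = [] := List.eq_nil_of_length_eq_zero (by omega)
    subst this
    rw [pvPipe, pvRuns]
    simp [pvStartsB]
  | succ N ih =>
    intro l hlen
    match l with
    | [] => rw [pvPipe, pvRuns]; simp [pvStartsB]
    | c :: rest =>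
      set l := c :: rest with hl
      set T := l.takeWhile (· == c) with hT
      set t := l.dropWhile (· == c) with ht
      set k := T.length with hk
      have hTt : T ++ t = l := List.takeWhile_append_dropWhile
      have hk1 : 1 ≤ k := by
        rw [hk, hT, hl, List.takeWhile_cons, if_pos (by simp)]; simp
      have hlent : l.length = k + t.length := by rw [← hTt]; simp [hk]
      have htlt : t.length ≤ N := by
        have h1 : t.length + k = l.length := by omega
        have h2 : l.length ≤ N + 1 := hlen
        omega
      have hkt : ∀ j : Nat, l[k + j]? = t[j]? := by
        intro j
        rw [← hTt, List.getElem?_append_right (by omega)]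
        congr 1; omega
      have hgetD : ∀ j : Nat, l.getD (k + j) ' ' = t.getD j ' ' := by
        intro j
        rw [List.getD_eq_getElem?_getD, List.getD_eq_getElem?_getD, hkt]
      have iht : pvPipe t m = pvRuns t 0 m := ih t htlt
      have hshift : pvRuns t k m =
          (pvRuns t 0 m).map (fun p => (p.1 + (k : Int), p.2.1 + (k : Int), p.2.2)) :=
        pvRuns_shift m t k 0
      have hS : pvStartsB l = 0 :: (pvStartsB t).map (fun j => k + j) := pvStartsB_cons c rest
      set S := pvStartsB t with hSdef
      set f : Nat → Nat := fun j => k + j with hf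
      -- RHS one step
      conv_rhs => rw [pvRuns]
      simp only [← hl, ← hT, ← ht, ← hk, Nat.zero_add]
      -- head of the zip is (0, k); tail is the zip over S.map f
      have hzhead : (0 :: S.map f).zip (S.map f ++ [l.length]) =
          (0, k) :: (S.map f).zip ((S.map f).drop 1 ++ [l.length]) := by
        cases htc : t with
        | nil =>
          have hS0 : S = [] := by rw [hSdef, htc, pvStartsB]; simp
          have : l.length = k := by rw [hlent, htc]; simp
          rw [hS0, this]; simp
        | cons c' r' =>
          obtain ⟨Stl, hStl⟩ : ∃ x, S = 0 :: x :=
            ⟨_, by rw [hSdef, htc]; exact pvStartsB_cons c' r'⟩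
          rw [hStl]
          simp [hf]
      -- the tail zip is the shift of t's zip
      have hzip : (S.map f).zip ((S.map f).drop 1 ++ [l.length]) =
          (S.zip (S.drop 1 ++ [t.length])).map (Prod.map f f) := by
        rw [← List.map_drop]
        have : (S.drop 1).map f ++ [l.length] = ((S.drop 1) ++ [t.length]).map f := by
          rw [List.map_append]
          simp [hf, hlent]
        rw [this, List.zip_map]
      -- assemble the left-hand side
      conv_lhs => rw [pvPipe]
      simp only [hS, List.drop_succ_cons, List.drop_zero]
      rw [hzhead, List.filter_cons, hzip, List.filter_map]
      have hpg : ((fun p : Nat × Nat => decide ((p.2 : Int) - (p.1 : Int) ≥ m)) ∘ Prod.map f f)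
          = (fun p : Nat × Nat => decide ((p.2 : Int) - (p.1 : Int) ≥ m)) := by
        funext p
        simp only [Function.comp_apply, Prod.map, hf, decide_eq_decide]
        push_cast
        omega
      rw [hpg]
      have hmapmap : List.map (fun p : Nat × Nat => ((p.1 : Int), (p.2 : Int), String.ofList [l.getD p.1 ' ']))
          (List.map (Prod.map f f)
            (List.filter (fun p : Nat × Nat => decide ((p.2 : Int) - (p.1 : Int) ≥ m))
              (S.zip (List.drop 1 S ++ [t.length])))) = pvRuns t k m := by
        rw [List.map_map]
        have hcomp : ((fun p : Nat × Nat => ((p.1 : Int), (p.2 : Int), String.ofList [l.getD p.1 ' '])) ∘ Prod.map f f)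
            = ((fun q : Int × Int × String => (q.1 + (k : Int), q.2.1 + (k : Int), q.2.2)) ∘
               (fun p : Nat × Nat => ((p.1 : Int), (p.2 : Int), String.ofList [t.getD p.1 ' ']))) := by
          funext p
          simp only [Function.comp_apply, Prod.map, hf, Prod.mk.injEq]
          refine ⟨by push_cast; ring, by push_cast; ring, by rw [hgetD]⟩
        rw [hcomp, ← List.map_map]
        have hpipet : List.map (fun p : Nat × Nat => ((p.1 : Int), (p.2 : Int), String.ofList [t.getD p.1 ' ']))
            (List.filter (fun p : Nat × Nat => decide ((p.2 : Int) - (p.1 : Int) ≥ m))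
              (S.zip (List.drop 1 S ++ [t.length]))) = pvPipe t m := by
          rw [pvPipe, hSdef]
        rw [hpipet, iht, ← hshift]
      by_cases hm : (k : Int) ≥ m
      · rw [if_pos (by simpa using hm), if_pos hm]
        simp only [List.map_cons, hmapmap]
        congr 1
      · rw [if_neg (by simpa using hm), if_neg hm]
        exact hmapmap

-- ===== VERDICT (by name: the statement is the Claim_ definition above) =====
theorem find_consecutive_bases_spec : Claim_equal_find_consecutive_bases := by
  intro s m _
  unfold Spec_find_consecutive_bases find_consecutive_bases
  have h1 : find_consecutive_bases_alt s m = pvPipe s.toList m := rfl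
  rw [h1, pvPipe_eq_runs m s.toList.length s.toList le_rfl]
  simpa using pvOuter_eq_runs s.toList m 0 []
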